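-- pv_equiv track=rewrite | github.com/dhankervikas/Compliance-Hub | Backend/reconstruct_master_file.py | get_process
-- ===== SOURCE A (Python) =====
-- MAPPING_RULES = {
--     "A.5": "Governance & Policy",
--     "A.6": "Governance & Policy",
--     "A.7": "HR Security",
--     "A.8": "Asset Management",
--     "A.9": "Access Control (IAM)",
--     "A.10": "Cryptography",
--     "A.11": "Physical Security",
--     "A.12.1": "Operations (General)",
--     "A.12.2": "Operations (General)",
--     "A.12.3": "Backup Management",
--     "A.12.4": "Logging & Monitoring",
--     "A.12.5": "Operations (General)",
--     "A.12.6": "Vulnerability Management",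
--     "A.12.7": "Operations (General)",
--     "A.13": "Network Security",
--     "A.14": "SDLC (Development)",
--     "A.15": "Supplier Mgmt",
--     "A.16": "Incident & Resilience",
--     "A.17": "Incident & Resilience",
--     "A.18": "Legal & Compliance",
--     # Clauses
--     "4.": "Governance & Policy",
--     "5.": "Governance & Policy",
--     "6.": "Risk Management",
--     "7.": "Governance & Policy",
--     "8.": "Operations (General)",
--     "9.": "Internal Audit",
--     "10.": "Improvement"
-- }
--
-- def get_process(clause_id):
--     if not isinstance(clause_id, str):
--         return "Uncategorized"
--
--     sorted_rules = sorted(MAPPING_RULES.items(), key=lambda x: len(x[0]), reverse=True)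
--
--     for prefix, process in sorted_rules:
--         if clause_id.startswith(prefix):
--             return process
--
--     return "Uncategorized"
-- ===== SOURCE B (Python) =====
-- # Decision-tree dispatch: classify the id by its leading shape ("A.12.", "A.1x",
-- # "A.x", "10.", "<digit>.") and finish with one small per-family table lookup;
-- # no rule table is sorted or scanned.
--
-- _A12 = {
--     "1": "Operations (General)",
--     "2": "Operations (General)",
--     "3": "Backup Management",
--     "4": "Logging & Monitoring",
--     "5": "Operations (General)",
--     "6": "Vulnerability Management",
--     "7": "Operations (General)",
-- }
--
-- _ANNEX_TEEN = {
--     "0": "Cryptography",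
--     "1": "Physical Security",
--     "3": "Network Security",
--     "4": "SDLC (Development)",
--     "5": "Supplier Mgmt",
--     "6": "Incident & Resilience",
--     "7": "Incident & Resilience",
--     "8": "Legal & Compliance",
-- }
--
-- _ANNEX_ONE = {
--     "5": "Governance & Policy",
--     "6": "Governance & Policy",
--     "7": "HR Security",
--     "8": "Asset Management",
--     "9": "Access Control (IAM)",
-- }
--
-- _CLAUSE = {
--     "4": "Governance & Policy",
--     "5": "Governance & Policy",
--     "6": "Risk Management",
--     "7": "Governance & Policy",
--     "8": "Operations (General)",
--     "9": "Internal Audit",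
-- }
--
-- def get_process(clause_id):
--     if not isinstance(clause_id, str):
--         return "Uncategorized"
--     if clause_id.startswith("A.12."):
--         return _A12.get(clause_id[5:6], "Uncategorized")
--     if clause_id.startswith("A.1"):
--         return _ANNEX_TEEN.get(clause_id[3:4], "Uncategorized")
--     if clause_id.startswith("A."):
--         return _ANNEX_ONE.get(clause_id[2:3], "Uncategorized")
--     if clause_id.startswith("10."):
--         return "Improvement"
--     if clause_id[1:2] == ".":
--         return _CLAUSE.get(clause_id[0:1], "Uncategorized")
--     return "Uncategorized"
-- ===== Notes on version B (the rewrite author's own statement) =====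
-- stated objective: simpler
-- what changed: B replaces A's sort-the-rules-by-length-and-scan-with-startswith by a decision tree that classifies the id's leading shape (A.12., A.1x, A.x, 10., digit-dot) and finishes with one lookup in a small per-family table keyed by a single character, so no rule table is sorted or scanned.
import Mathlib
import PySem

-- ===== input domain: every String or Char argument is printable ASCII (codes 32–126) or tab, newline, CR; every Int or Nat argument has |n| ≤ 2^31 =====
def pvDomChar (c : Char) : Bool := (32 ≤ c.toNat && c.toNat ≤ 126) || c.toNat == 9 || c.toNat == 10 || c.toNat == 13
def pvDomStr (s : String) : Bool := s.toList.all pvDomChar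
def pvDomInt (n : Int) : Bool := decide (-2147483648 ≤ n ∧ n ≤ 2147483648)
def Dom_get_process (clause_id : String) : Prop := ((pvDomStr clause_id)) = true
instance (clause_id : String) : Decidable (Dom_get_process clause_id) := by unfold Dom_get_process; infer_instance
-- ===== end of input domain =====

-- B replaces A's sort-the-rules-by-length-and-scan-with-startswith by a decision tree on the
-- id's leading shape with one small per-family table lookup (simpler: no sort, no table scan).
-- Python's isinstance(clause_id, str) guard is vacuous under the String type of the port.

-- ===== PORT A =====
-- MAPPING_RULES in insertion order
def pvRules : List (String × String) :=
  [("A.5", "Governance & Policy"), ("A.6", "Governance & Policy"), ("A.7", "HR Security"),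
   ("A.8", "Asset Management"), ("A.9", "Access Control (IAM)"), ("A.10", "Cryptography"),
   ("A.11", "Physical Security"), ("A.12.1", "Operations (General)"), ("A.12.2", "Operations (General)"),
   ("A.12.3", "Backup Management"), ("A.12.4", "Logging & Monitoring"), ("A.12.5", "Operations (General)"),
   ("A.12.6", "Vulnerability Management"), ("A.12.7", "Operations (General)"), ("A.13", "Network Security"),
   ("A.14", "SDLC (Development)"), ("A.15", "Supplier Mgmt"), ("A.16", "Incident & Resilience"),
   ("A.17", "Incident & Resilience"), ("A.18", "Legal & Compliance"), ("4.", "Governance & Policy"),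
   ("5.", "Governance & Policy"), ("6.", "Risk Management"), ("7.", "Governance & Policy"),
   ("8.", "Operations (General)"), ("9.", "Internal Audit"), ("10.", "Improvement")]

def pvMAPPING_RULES : PySem.Dict String String := PySem.Dict.ofList pvRules

-- the 'for prefix, process in sorted_rules: if clause_id.startswith(prefix): return process' loop
def pvScanA : List (String × String) → String → String
  | [], _ => "Uncategorized"
  | (prefix_, process) :: rest, clause_id =>
      if PySem.Str.startswith clause_id prefix_ then process else pvScanA rest clause_id

def get_process (clause_id : String) : String :=
  pvScanA (PySem.List.sorted pvMAPPING_RULES.items (fun x => PySem.Str.len x.1) true) clause_id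

-- ===== PORT B =====
-- _A12
def pvA12 : PySem.Dict String String := PySem.Dict.ofList
  [("1", "Operations (General)"), ("2", "Operations (General)"), ("3", "Backup Management"),
   ("4", "Logging & Monitoring"), ("5", "Operations (General)"), ("6", "Vulnerability Management"),
   ("7", "Operations (General)")]

-- _ANNEX_TEEN
def pvAnnexTeen : PySem.Dict String String := PySem.Dict.ofList
  [("0", "Cryptography"), ("1", "Physical Security"), ("3", "Network Security"),
   ("4", "SDLC (Development)"), ("5", "Supplier Mgmt"), ("6", "Incident & Resilience"),
   ("7", "Incident & Resilience"), ("8", "Legal & Compliance")]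

-- _ANNEX_ONE
def pvAnnexOne : PySem.Dict String String := PySem.Dict.ofList
  [("5", "Governance & Policy"), ("6", "Governance & Policy"), ("7", "HR Security"),
   ("8", "Asset Management"), ("9", "Access Control (IAM)")]

-- _CLAUSE
def pvClause : PySem.Dict String String := PySem.Dict.ofList
  [("4", "Governance & Policy"), ("5", "Governance & Policy"), ("6", "Risk Management"),
   ("7", "Governance & Policy"), ("8", "Operations (General)"), ("9", "Internal Audit")]

def get_process_alt (clause_id : String) : String :=
  if PySem.Str.startswith clause_id "A.12." then
    pvA12.getD (PySem.Str.slice clause_id (some 5) (some 6)) "Uncategorized"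
  else if PySem.Str.startswith clause_id "A.1" then
    pvAnnexTeen.getD (PySem.Str.slice clause_id (some 3) (some 4)) "Uncategorized"
  else if PySem.Str.startswith clause_id "A." then
    pvAnnexOne.getD (PySem.Str.slice clause_id (some 2) (some 3)) "Uncategorized"
  else if PySem.Str.startswith clause_id "10." then "Improvement"
  else if PySem.Str.slice clause_id (some 1) (some 2) == "." then
    pvClause.getD (PySem.Str.slice clause_id (some 0) (some 1)) "Uncategorized"
  else "Uncategorized"

-- ===== PRECONDITION & SPEC =====
def Spec_get_process (clause_id : String) (out : String) : Prop := out = get_process_alt clause_id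
instance (clause_id : String) (out : String) : Decidable (Spec_get_process clause_id out) := by unfold Spec_get_process; infer_instance

-- ===== CLAIM (what is proved, stated in full; the proofs are below) =====
def Claim_equal_get_process : Prop := ∀ (clause_id : String), Dom_get_process clause_id → Spec_get_process clause_id (get_process clause_id)

-- ===== LEMMAS AND PROOFS =====
-- A's rule table sorted by key length, longest first (Python's stable sort)
def pvSortedRules : List (String × String) :=
  [("A.12.1", "Operations (General)"), ("A.12.2", "Operations (General)"), ("A.12.3", "Backup Management"),
   ("A.12.4", "Logging & Monitoring"), ("A.12.5", "Operations (General)"), ("A.12.6", "Vulnerability Management"),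
   ("A.12.7", "Operations (General)"),
   ("A.10", "Cryptography"), ("A.11", "Physical Security"), ("A.13", "Network Security"),
   ("A.14", "SDLC (Development)"), ("A.15", "Supplier Mgmt"), ("A.16", "Incident & Resilience"),
   ("A.17", "Incident & Resilience"), ("A.18", "Legal & Compliance"),
   ("A.5", "Governance & Policy"), ("A.6", "Governance & Policy"), ("A.7", "HR Security"),
   ("A.8", "Asset Management"), ("A.9", "Access Control (IAM)"), ("10.", "Improvement"),
   ("4.", "Governance & Policy"), ("5.", "Governance & Policy"), ("6.", "Risk Management"),
   ("7.", "Governance & Policy"), ("8.", "Operations (General)"), ("9.", "Internal Audit")]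

lemma pvSorted_eq :
    PySem.List.sorted pvMAPPING_RULES.items (fun x => PySem.Str.len x.1) true = pvSortedRules := by
  decide

-- String equality tested on the underlying character lists
lemma pvStrBeq (a b : String) : (a == b) = (a.toList == b.toList) := by
  rw [Bool.eq_iff_iff, beq_iff_eq, beq_iff_eq, String.toList_inj]

-- the four small tables as literal association lists (so get?_mk_cons applies)
lemma pvD12 : pvA12 = PySem.Dict.mk
    [("1", "Operations (General)"), ("2", "Operations (General)"), ("3", "Backup Management"),
     ("4", "Logging & Monitoring"), ("5", "Operations (General)"), ("6", "Vulnerability Management"),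
     ("7", "Operations (General)")] := by decide

lemma pvDTeen : pvAnnexTeen = PySem.Dict.mk
    [("0", "Cryptography"), ("1", "Physical Security"), ("3", "Network Security"),
     ("4", "SDLC (Development)"), ("5", "Supplier Mgmt"), ("6", "Incident & Resilience"),
     ("7", "Incident & Resilience"), ("8", "Legal & Compliance")] := by decide

lemma pvDOne : pvAnnexOne = PySem.Dict.mk
    [("5", "Governance & Policy"), ("6", "Governance & Policy"), ("7", "HR Security"),
     ("8", "Asset Management"), ("9", "Access Control (IAM)")] := by decide

lemma pvDClause : pvClause = PySem.Dict.mk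
    [("4", "Governance & Policy"), ("5", "Governance & Policy"), ("6", "Risk Management"),
     ("7", "Governance & Policy"), ("8", "Operations (General)"), ("9", "Internal Audit")] := by decide

lemma pvCase0 :
    get_process (String.ofList []) = get_process_alt (String.ofList []) := by decide

lemma pvCase1 (c1 : Char) :
    get_process (String.ofList [c1]) = get_process_alt (String.ofList [c1]) := by
  unfold get_process get_process_alt
  rw [pvSorted_eq]
  simp [pvSortedRules, pvScanA, PySem.Str.startswith_eq, PySem.Chars.startswith, List.isPrefixOf, pvStrBeq, PySem.Str.slice, PySem.Chars.slice, PySem.List.slice, PySem.List.clampIdx]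

lemma pvCase2 (c1 c2 : Char) :
    get_process (String.ofList [c1, c2]) = get_process_alt (String.ofList [c1, c2]) := by
  unfold get_process get_process_alt
  rw [pvSorted_eq]
  by_cases h1 : 'A' = c1
  · subst h1
    by_cases h2 : '.' = c2
    · subst h2
      simp [pvD12, pvDTeen, pvDOne, pvDClause, pvSortedRules, pvScanA, PySem.Str.startswith_eq, PySem.Chars.startswith, List.isPrefixOf, pvStrBeq, PySem.Dict.getD, PySem.Dict.get?_mk_cons, PySem.Str.slice, PySem.Chars.slice, PySem.List.slice, PySem.List.clampIdx]
      try split_ifs <;> rfl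
      try rfl
    · simp [pvD12, pvDTeen, pvDOne, pvDClause, pvSortedRules, pvScanA, PySem.Str.startswith_eq, PySem.Chars.startswith, List.isPrefixOf, pvStrBeq, PySem.Dict.getD, PySem.Dict.get?_mk_cons, PySem.Str.slice, PySem.Chars.slice, PySem.List.slice, PySem.List.clampIdx, h2, Ne.symm h2]
      try split_ifs <;> rfl
      try rfl
  · by_cases h2 : '.' = c2
    · subst h2
      simp [pvD12, pvDTeen, pvDOne, pvDClause, pvSortedRules, pvScanA, PySem.Str.startswith_eq, PySem.Chars.startswith, List.isPrefixOf, pvStrBeq, PySem.Dict.getD, PySem.Dict.get?_mk_cons, PySem.Str.slice, PySem.Chars.slice, PySem.List.slice, PySem.List.clampIdx, h1, Ne.symm h1]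
      try split_ifs <;> rfl
      try rfl
    · simp [pvD12, pvDTeen, pvDOne, pvDClause, pvSortedRules, pvScanA, PySem.Str.startswith_eq, PySem.Chars.startswith, List.isPrefixOf, pvStrBeq, PySem.Dict.getD, PySem.Dict.get?_mk_cons, PySem.Str.slice, PySem.Chars.slice, PySem.List.slice, PySem.List.clampIdx, h1, Ne.symm h1, h2, Ne.symm h2]
      try split_ifs <;> rfl
      try rfl

lemma pvCase3 (c1 c2 c3 : Char) :
    get_process (String.ofList [c1, c2, c3]) = get_process_alt (String.ofList [c1, c2, c3]) := by
  unfold get_process get_process_alt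
  rw [pvSorted_eq]
  by_cases h1 : 'A' = c1
  · subst h1
    by_cases h2 : '.' = c2
    · subst h2
      by_cases h3 : '1' = c3
      · subst h3
        simp [pvD12, pvDTeen, pvDOne, pvDClause, pvSortedRules, pvScanA, PySem.Str.startswith_eq, PySem.Chars.startswith, List.isPrefixOf, pvStrBeq, PySem.Dict.getD, PySem.Dict.get?_mk_cons, PySem.Str.slice, PySem.Chars.slice, PySem.List.slice, PySem.List.clampIdx]
        try split_ifs <;> rfl
        try rfl
      · simp [pvD12, pvDTeen, pvDOne, pvDClause, pvSortedRules, pvScanA, PySem.Str.startswith_eq, PySem.Chars.startswith, List.isPrefixOf, pvStrBeq, PySem.Dict.getD, PySem.Dict.get?_mk_cons, PySem.Str.slice, PySem.Chars.slice, PySem.List.slice, PySem.List.clampIdx, h3, Ne.symm h3]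
        try split_ifs <;> rfl
        try rfl
    · simp [pvD12, pvDTeen, pvDOne, pvDClause, pvSortedRules, pvScanA, PySem.Str.startswith_eq, PySem.Chars.startswith, List.isPrefixOf, pvStrBeq, PySem.Dict.getD, PySem.Dict.get?_mk_cons, PySem.Str.slice, PySem.Chars.slice, PySem.List.slice, PySem.List.clampIdx, h2, Ne.symm h2]
      try split_ifs <;> rfl
      try rfl
  · by_cases h2 : '.' = c2
    · subst h2
      simp [pvD12, pvDTeen, pvDOne, pvDClause, pvSortedRules, pvScanA, PySem.Str.startswith_eq, PySem.Chars.startswith, List.isPrefixOf, pvStrBeq, PySem.Dict.getD, PySem.Dict.get?_mk_cons, PySem.Str.slice, PySem.Chars.slice, PySem.List.slice, PySem.List.clampIdx, h1, Ne.symm h1]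
      try split_ifs <;> rfl
      try rfl
    · simp [pvD12, pvDTeen, pvDOne, pvDClause, pvSortedRules, pvScanA, PySem.Str.startswith_eq, PySem.Chars.startswith, List.isPrefixOf, pvStrBeq, PySem.Dict.getD, PySem.Dict.get?_mk_cons, PySem.Str.slice, PySem.Chars.slice, PySem.List.slice, PySem.List.clampIdx, h1, Ne.symm h1, h2, Ne.symm h2]
      try split_ifs <;> rfl
      try rfl

lemma pvCase4 (c1 c2 c3 c4 : Char) :
    get_process (String.ofList [c1, c2, c3, c4]) = get_process_alt (String.ofList [c1, c2, c3, c4]) := by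
  unfold get_process get_process_alt
  rw [pvSorted_eq]
  by_cases h1 : 'A' = c1
  · subst h1
    by_cases h2 : '.' = c2
    · subst h2
      by_cases h3 : '1' = c3
      · subst h3
        simp [pvD12, pvDTeen, pvDOne, pvDClause, pvSortedRules, pvScanA, PySem.Str.startswith_eq, PySem.Chars.startswith, List.isPrefixOf, pvStrBeq, PySem.Dict.getD, PySem.Dict.get?_mk_cons, PySem.Str.slice, PySem.Chars.slice, PySem.List.slice, PySem.List.clampIdx]
        try split_ifs <;> rfl
        try rfl
      · simp [pvD12, pvDTeen, pvDOne, pvDClause, pvSortedRules, pvScanA, PySem.Str.startswith_eq, PySem.Chars.startswith, List.isPrefixOf, pvStrBeq, PySem.Dict.getD, PySem.Dict.get?_mk_cons, PySem.Str.slice, PySem.Chars.slice, PySem.List.slice, PySem.List.clampIdx, h3, Ne.symm h3]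
        try split_ifs <;> rfl
        try rfl
    · simp [pvD12, pvDTeen, pvDOne, pvDClause, pvSortedRules, pvScanA, PySem.Str.startswith_eq, PySem.Chars.startswith, List.isPrefixOf, pvStrBeq, PySem.Dict.getD, PySem.Dict.get?_mk_cons, PySem.Str.slice, PySem.Chars.slice, PySem.List.slice, PySem.List.clampIdx, h2, Ne.symm h2]
      try split_ifs <;> rfl
      try rfl
  · by_cases h2 : '.' = c2
    · subst h2
      simp [pvD12, pvDTeen, pvDOne, pvDClause, pvSortedRules, pvScanA, PySem.Str.startswith_eq, PySem.Chars.startswith, List.isPrefixOf, pvStrBeq, PySem.Dict.getD, PySem.Dict.get?_mk_cons, PySem.Str.slice, PySem.Chars.slice, PySem.List.slice, PySem.List.clampIdx, h1, Ne.symm h1]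
      try split_ifs <;> rfl
      try rfl
    · simp [pvD12, pvDTeen, pvDOne, pvDClause, pvSortedRules, pvScanA, PySem.Str.startswith_eq, PySem.Chars.startswith, List.isPrefixOf, pvStrBeq, PySem.Dict.getD, PySem.Dict.get?_mk_cons, PySem.Str.slice, PySem.Chars.slice, PySem.List.slice, PySem.List.clampIdx, h1, Ne.symm h1, h2, Ne.symm h2]
      try split_ifs <;> rfl
      try rfl

lemma pvCase5 (c1 c2 c3 c4 c5 : Char) :
    get_process (String.ofList [c1, c2, c3, c4, c5]) = get_process_alt (String.ofList [c1, c2, c3, c4, c5]) := by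
  unfold get_process get_process_alt
  rw [pvSorted_eq]
  by_cases h1 : 'A' = c1
  · subst h1
    by_cases h2 : '.' = c2
    · subst h2
      by_cases h3 : '1' = c3
      · subst h3
        by_cases h4 : '2' = c4
        · subst h4
          simp [pvD12, pvDTeen, pvDOne, pvDClause, pvSortedRules, pvScanA, PySem.Str.startswith_eq, PySem.Chars.startswith, List.isPrefixOf, pvStrBeq, PySem.Dict.getD, PySem.Dict.get?_mk_cons, PySem.Str.slice, PySem.Chars.slice, PySem.List.slice, PySem.List.clampIdx]
          try split_ifs <;> rfl
          try rfl
        · simp [pvD12, pvDTeen, pvDOne, pvDClause, pvSortedRules, pvScanA, PySem.Str.startswith_eq, PySem.Chars.startswith, List.isPrefixOf, pvStrBeq, PySem.Dict.getD, PySem.Dict.get?_mk_cons, PySem.Str.slice, PySem.Chars.slice, PySem.List.slice, PySem.List.clampIdx, h4, Ne.symm h4]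
          try split_ifs <;> rfl
          try rfl
      · simp [pvD12, pvDTeen, pvDOne, pvDClause, pvSortedRules, pvScanA, PySem.Str.startswith_eq, PySem.Chars.startswith, List.isPrefixOf, pvStrBeq, PySem.Dict.getD, PySem.Dict.get?_mk_cons, PySem.Str.slice, PySem.Chars.slice, PySem.List.slice, PySem.List.clampIdx, h3, Ne.symm h3]
        try split_ifs <;> rfl
        try rfl
    · simp [pvD12, pvDTeen, pvDOne, pvDClause, pvSortedRules, pvScanA, PySem.Str.startswith_eq, PySem.Chars.startswith, List.isPrefixOf, pvStrBeq, PySem.Dict.getD, PySem.Dict.get?_mk_cons, PySem.Str.slice, PySem.Chars.slice, PySem.List.slice, PySem.List.clampIdx, h2, Ne.symm h2]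
      try split_ifs <;> rfl
      try rfl
  · by_cases h2 : '.' = c2
    · subst h2
      simp [pvD12, pvDTeen, pvDOne, pvDClause, pvSortedRules, pvScanA, PySem.Str.startswith_eq, PySem.Chars.startswith, List.isPrefixOf, pvStrBeq, PySem.Dict.getD, PySem.Dict.get?_mk_cons, PySem.Str.slice, PySem.Chars.slice, PySem.List.slice, PySem.List.clampIdx, h1, Ne.symm h1]
      try split_ifs <;> rfl
      try rfl
    · simp [pvD12, pvDTeen, pvDOne, pvDClause, pvSortedRules, pvScanA, PySem.Str.startswith_eq, PySem.Chars.startswith, List.isPrefixOf, pvStrBeq, PySem.Dict.getD, PySem.Dict.get?_mk_cons, PySem.Str.slice, PySem.Chars.slice, PySem.List.slice, PySem.List.clampIdx, h1, Ne.symm h1, h2, Ne.symm h2]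
      try split_ifs <;> rfl
      try rfl

lemma pvCase6 (c1 c2 c3 c4 c5 c6 : Char) (r : List Char) :
    get_process (String.ofList (c1 :: c2 :: c3 :: c4 :: c5 :: c6 :: r)) = get_process_alt (String.ofList (c1 :: c2 :: c3 :: c4 :: c5 :: c6 :: r)) := by
  unfold get_process get_process_alt
  rw [pvSorted_eq]
  by_cases h1 : 'A' = c1
  · subst h1
    by_cases h2 : '.' = c2
    · subst h2
      by_cases h3 : '1' = c3
      · subst h3
        by_cases h4 : '2' = c4
        · subst h4
          by_cases h5 : '.' = c5
          · subst h5
            simp [pvD12, pvDTeen, pvDOne, pvDClause, pvSortedRules, pvScanA, PySem.Str.startswith_eq, PySem.Chars.startswith, List.isPrefixOf, pvStrBeq, PySem.Dict.getD, PySem.Dict.get?_mk_cons, PySem.Str.slice, PySem.Chars.slice, PySem.List.slice, PySem.List.clampIdx]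
            try split_ifs <;> rfl
            try rfl
          · simp [pvD12, pvDTeen, pvDOne, pvDClause, pvSortedRules, pvScanA, PySem.Str.startswith_eq, PySem.Chars.startswith, List.isPrefixOf, pvStrBeq, PySem.Dict.getD, PySem.Dict.get?_mk_cons, PySem.Str.slice, PySem.Chars.slice, PySem.List.slice, PySem.List.clampIdx, h5, Ne.symm h5]
            try split_ifs <;> rfl
            try rfl
        · simp [pvD12, pvDTeen, pvDOne, pvDClause, pvSortedRules, pvScanA, PySem.Str.startswith_eq, PySem.Chars.startswith, List.isPrefixOf, pvStrBeq, PySem.Dict.getD, PySem.Dict.get?_mk_cons, PySem.Str.slice, PySem.Chars.slice, PySem.List.slice, PySem.List.clampIdx, h4, Ne.symm h4]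
          try split_ifs <;> rfl
          try rfl
      · simp [pvD12, pvDTeen, pvDOne, pvDClause, pvSortedRules, pvScanA, PySem.Str.startswith_eq, PySem.Chars.startswith, List.isPrefixOf, pvStrBeq, PySem.Dict.getD, PySem.Dict.get?_mk_cons, PySem.Str.slice, PySem.Chars.slice, PySem.List.slice, PySem.List.clampIdx, h3, Ne.symm h3]
        try split_ifs <;> rfl
        try rfl
    · simp [pvD12, pvDTeen, pvDOne, pvDClause, pvSortedRules, pvScanA, PySem.Str.startswith_eq, PySem.Chars.startswith, List.isPrefixOf, pvStrBeq, PySem.Dict.getD, PySem.Dict.get?_mk_cons, PySem.Str.slice, PySem.Chars.slice, PySem.List.slice, PySem.List.clampIdx, h2, Ne.symm h2]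
      try split_ifs <;> rfl
      try rfl
  · by_cases h2 : '.' = c2
    · subst h2
      simp [pvD12, pvDTeen, pvDOne, pvDClause, pvSortedRules, pvScanA, PySem.Str.startswith_eq, PySem.Chars.startswith, List.isPrefixOf, pvStrBeq, PySem.Dict.getD, PySem.Dict.get?_mk_cons, PySem.Str.slice, PySem.Chars.slice, PySem.List.slice, PySem.List.clampIdx, h1, Ne.symm h1]
      try split_ifs <;> rfl
      try rfl
    · simp [pvD12, pvDTeen, pvDOne, pvDClause, pvSortedRules, pvScanA, PySem.Str.startswith_eq, PySem.Chars.startswith, List.isPrefixOf, pvStrBeq, PySem.Dict.getD, PySem.Dict.get?_mk_cons, PySem.Str.slice, PySem.Chars.slice, PySem.List.slice, PySem.List.clampIdx, h1, Ne.symm h1, h2, Ne.symm h2]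
      try split_ifs <;> rfl
      try rfl


lemma pvMain (s : String) : get_process s = get_process_alt s := by
  obtain ⟨l, rfl⟩ : ∃ l, s = String.ofList l := ⟨s.toList, by simp⟩
  rcases l with _ | ⟨c1, _ | ⟨c2, _ | ⟨c3, _ | ⟨c4, _ | ⟨c5, _ | ⟨c6, r⟩⟩⟩⟩⟩⟩
  · exact pvCase0
  · exact pvCase1 c1
  · exact pvCase2 c1 c2
  · exact pvCase3 c1 c2 c3
  · exact pvCase4 c1 c2 c3 c4
  · exact pvCase5 c1 c2 c3 c4 c5
  · exact pvCase6 c1 c2 c3 c4 c5 c6 r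

-- ===== VERDICT (by name: the statement is the Claim_ definition above) =====
theorem get_process_spec : Claim_equal_get_process := by
  intro s _
  unfold Spec_get_process
  exact pvMain s
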